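-- pv_equiv track=rewrite | github.com/amromics/panka | pangraph/utils.py | buildOverlapEdge
-- ===== SOURCE A (Python) =====
-- def reverse_complement(seq):
--     complement = {'A': 'T', 'C': 'G', 'G': 'C', 'T': 'A', '_':'_','*':'*'}
--     # seq = "TCGGGCCC"
--     reverse_complement = "".join(complement.get(base, base) for base in reversed(seq))
--     return(reverse_complement)
--
-- def getOverlapLength(i, j):
--     for ele in range(min(500,len(j)), -1, -1):
--         if i.endswith(j[:ele]):
--             return ele
--     return 0
--
-- def buildOverlapEdge(contigs, min_overlap=30, graph = "directed"):
--     # contigs: dict of contigs (key = contig id, value = sequence)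
--     # min_overlap: minimum
--     # return: a list of overlap edges
--     ## reimplementing the reverse_complement: not all need to be computed.
--     edge_list_overlap = []
--     if graph=='directed':
--         for key1 in contigs:
--             for key2 in contigs:
--                 if key1 != key2:
--                     if getOverlapLength(contigs[key1], contigs[key2]) >= min_overlap:
--                         edge_list_overlap.append((key1 + '+', key2 + '+'))
--                         edge_list_overlap.append((key2 + '-', key1 + '-'))
--                     minsize = min(len(contigs[key2]), 500)
--                     if getOverlapLength(contigs[key1], reverse_complement(contigs[key2][-minsize:-1])) >= min_overlap:
--                         edge_list_overlap.append((key1+ '+', key2 + '-'))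
--                         edge_list_overlap.append((key2 + '+', key1 + '-'))
--     else:
--         for key1 in contigs:
--             for key2 in contigs:
--                 if key1 != key2:
--                     if getOverlapLength(contigs[key1], contigs[key2]) >= min_overlap:
--                         edge_list_overlap.append((key1, key2))
--                     minsize = min(len(contigs[key2]), 500)
--                     if getOverlapLength(contigs[key1], reverse_complement(contigs[key2][-minsize:-1])) >= min_overlap:
--                         edge_list_overlap.append((key1, key2))
--
--     return(edge_list_overlap)
-- ===== SOURCE B (Python) =====
-- def reverse_complement(seq):
--     complement = {'A': 'T', 'C': 'G', 'G': 'C', 'T': 'A', '_': '_', '*': '*'}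
--     return "".join(complement.get(base, base) for base in reversed(seq))
--
-- def _suffix_prefix_overlap(text, pat):
--     # longest e with text ending in pat[:e] (pat capped at 500), by a single
--     # left-to-right pass that tracks every live prefix-match length at once
--     pat = pat[:500]
--     t = text[len(text) - len(pat):] if len(text) > len(pat) else text
--     live = [0]
--     for c in t:
--         live = [e + 1 for e in live if e < len(pat) and pat[e] == c] + [0]
--     return live[0]
--
-- def buildOverlapEdge(contigs, min_overlap=30, graph="directed"):
--     pre = []
--     for key, s in contigs.items():
--         minsize = min(len(s), 500)
--         pre.append((key, s, reverse_complement(s[-minsize:-1])))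
--     edges = []
--     for key1, s1, _ in pre:
--         for key2, s2, rc2 in pre:
--             if key1 == key2:
--                 continue
--             if _suffix_prefix_overlap(s1, s2) >= min_overlap:
--                 edges += [(key1 + '+', key2 + '+'), (key2 + '-', key1 + '-')] if graph == 'directed' else [(key1, key2)]
--             if _suffix_prefix_overlap(s1, rc2) >= min_overlap:
--                 edges += [(key1 + '+', key2 + '-'), (key2 + '+', key1 + '-')] if graph == 'directed' else [(key1, key2)]
--     return edges
-- ===== Notes on version B (the rewrite author's own statement) =====
-- stated objective: alternative
-- what changed: Per pair, A probes up to 501 candidate prefix lengths with endswith (descending, early return) and recomputes the reverse complement inside the inner loop; B precomputes each contig's reverse complement once and finds the longest suffix-prefix overlap in a single left-to-right pass over the last 500 characters, maintaining the list of all live prefix-match lengths.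
import Mathlib
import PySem

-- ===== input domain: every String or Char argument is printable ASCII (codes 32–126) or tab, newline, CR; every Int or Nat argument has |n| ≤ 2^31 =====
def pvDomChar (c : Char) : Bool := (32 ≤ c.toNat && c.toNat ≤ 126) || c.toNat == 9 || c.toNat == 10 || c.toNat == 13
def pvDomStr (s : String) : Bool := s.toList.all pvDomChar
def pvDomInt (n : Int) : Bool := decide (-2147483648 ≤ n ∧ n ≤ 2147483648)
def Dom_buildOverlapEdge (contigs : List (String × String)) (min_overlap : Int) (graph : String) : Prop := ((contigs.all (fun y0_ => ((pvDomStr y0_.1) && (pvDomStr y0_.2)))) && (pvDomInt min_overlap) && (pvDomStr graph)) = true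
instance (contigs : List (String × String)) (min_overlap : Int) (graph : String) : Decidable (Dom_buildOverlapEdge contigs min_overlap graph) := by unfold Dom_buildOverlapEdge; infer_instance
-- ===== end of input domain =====

-- B replaces A's per-pair scan of up to 501 `endswith` probes by one left-to-right pass
-- that tracks all live prefix-match lengths, and hoists the reverse-complement out of the
-- inner loop (objective: alternative algorithm, same measured cost).

-- ===== PORT A =====
-- module helper reverse_complement (identical source in Source A and Source B, so shared by both ports)
def pyReverseComplement (seq : String) : String :=
  String.ofList ((seq.toList.reverse).map (fun base =>
    ((PySem.Dict.ofList [('A','T'),('C','G'),('G','C'),('T','A'),('_','_'),('*','*')]).get? base).getD base))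

-- the early-returning `for ele in range(min(500,len(j)), -1, -1)` loop of getOverlapLength
def findOverlapFrom (i j : String) : List Int → Int
  | [] => 0
  | ele :: rest =>
    if PySem.Str.endswith i (PySem.Str.slice j none (some ele)) then ele
    else findOverlapFrom i j rest

def getOverlapLength (i j : String) : Int :=
  findOverlapFrom i j (PySem.List.pyRange (min 500 (PySem.Str.len j)) (-1) (-1))

def buildOverlapEdge (contigs : List (String × String)) (min_overlap : Int) (graph : String) : List (String × String) :=
  let d := PySem.Dict.ofList contigs   -- the Python function receives this dict
  if graph == "directed" then
    d.keys.foldl (fun acc key1 =>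
      d.keys.foldl (fun acc key2 =>
        if key1 ≠ key2 then
          -- contigs[key1] / contigs[key2]: key from iteration, lookup total (getD default never used)
          let acc := if getOverlapLength (d.getD key1 "") (d.getD key2 "") ≥ min_overlap
            then (acc ++ [(key1 ++ "+", key2 ++ "+")]) ++ [(key2 ++ "-", key1 ++ "-")] else acc
          let minsize : Int := min (PySem.Str.len (d.getD key2 "")) 500
          if getOverlapLength (d.getD key1 "")
               (pyReverseComplement (PySem.Str.slice (d.getD key2 "") (some (-minsize)) (some (-1)))) ≥ min_overlap
            then (acc ++ [(key1 ++ "+", key2 ++ "-")]) ++ [(key2 ++ "+", key1 ++ "-")] else acc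
        else acc) acc) ([] : List (String × String))
  else
    d.keys.foldl (fun acc key1 =>
      d.keys.foldl (fun acc key2 =>
        if key1 ≠ key2 then
          let acc := if getOverlapLength (d.getD key1 "") (d.getD key2 "") ≥ min_overlap
            then acc ++ [(key1, key2)] else acc
          let minsize : Int := min (PySem.Str.len (d.getD key2 "")) 500
          if getOverlapLength (d.getD key1 "")
               (pyReverseComplement (PySem.Str.slice (d.getD key2 "") (some (-minsize)) (some (-1)))) ≥ min_overlap
            then acc ++ [(key1, key2)] else acc
        else acc) acc) ([] : List (String × String))

-- ===== PORT B =====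
-- one step of the live-prefix-length pass: [e + 1 for e in live if e < len(pat) and pat[e] == c] + [0]
def spStep (p : List Char) (live : List Nat) (c : Char) : List Nat :=
  (live.filter (fun e => decide (e < p.length) && (p.getD e ' ' == c))).map (· + 1) ++ [0]

def spOverlap (text pat : String) : Int :=
  let p := (PySem.Str.slice pat none (some 500)).toList
  let t := if PySem.Str.len text > (p.length : Int)
           then (PySem.Str.slice text (some (PySem.Str.len text - (p.length : Int))) none).toList
           else text.toList
  let live := t.foldl (spStep p) [0]
  (((live[0]?).getD 0 : Nat) : Int)   -- live[0]; live always carries the trailing 0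

def buildOverlapEdge_alt (contigs : List (String × String)) (min_overlap : Int) (graph : String) : List (String × String) :=
  let d := PySem.Dict.ofList contigs
  let pre := d.items.map (fun kv =>
    let minsize : Int := min (PySem.Str.len kv.2) 500
    (kv.1, kv.2, pyReverseComplement (PySem.Str.slice kv.2 (some (-minsize)) (some (-1)))))
  pre.foldl (fun acc x =>
    pre.foldl (fun acc y =>
      if x.1 = y.1 then acc
      else
        let acc := if spOverlap x.2.1 y.2.1 ≥ min_overlap
          then acc ++ (if graph == "directed"
                       then [(x.1 ++ "+", y.1 ++ "+"), (y.1 ++ "-", x.1 ++ "-")]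
                       else [(x.1, y.1)])
          else acc
        if spOverlap x.2.1 y.2.2 ≥ min_overlap
          then acc ++ (if graph == "directed"
                       then [(x.1 ++ "+", y.1 ++ "-"), (y.1 ++ "+", x.1 ++ "-")]
                       else [(x.1, y.1)])
          else acc) acc) ([] : List (String × String))

-- ===== PRECONDITION & SPEC =====
def Spec_buildOverlapEdge (contigs : List (String × String)) (min_overlap : Int) (graph : String) (out : List (String × String)) : Prop := out = buildOverlapEdge_alt contigs min_overlap graph
instance (contigs : List (String × String)) (min_overlap : Int) (graph : String) (out : List (String × String)) : Decidable (Spec_buildOverlapEdge contigs min_overlap graph out) := by unfold Spec_buildOverlapEdge; infer_instance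

-- ===== CLAIM (what is proved, stated in full; the proofs are below) =====
def Claim_equal_buildOverlapEdge : Prop := ∀ (contigs : List (String × String)) (min_overlap : Int) (graph : String), Dom_buildOverlapEdge contigs min_overlap graph → Spec_buildOverlapEdge contigs min_overlap graph (buildOverlapEdge contigs min_overlap graph)

-- ===== LEMMAS AND PROOFS =====

theorem suffix_concat_iff (l1 l2 : List Char) (a c : Char) :
    l1 ++ [a] <:+ l2 ++ [c] ↔ a = c ∧ l1 <:+ l2 := by
  rw [← List.reverse_prefix, List.reverse_append, List.reverse_append]
  simp only [List.reverse_singleton, List.singleton_append, List.cons_prefix_cons,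
    List.reverse_prefix]

theorem suffix_of_suffix_le (xs t I : List Char) (hxs : xs <:+ I) (ht : t <:+ I)
    (hle : xs.length ≤ t.length) : xs <:+ t := by
  have h1 := List.suffix_iff_eq_drop.1 hxs
  have h2 := List.suffix_iff_eq_drop.1 ht
  have hxI := List.IsSuffix.length_le hxs
  have htI := List.IsSuffix.length_le ht
  rw [List.suffix_iff_eq_drop]
  calc xs = I.drop (I.length - xs.length) := h1
    _ = (I.drop (I.length - t.length)).drop (t.length - xs.length) := by
        rw [List.drop_drop]; congr 1; omega
    _ = t.drop (t.length - xs.length) := by rw [← h2]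

-- A's descending scan computes the greatest matching prefix length
theorem findOverlap_eq (i j : String) : ∀ (M : Nat),
    findOverlapFrom i j (PySem.List.pyRange (M : Int) (-1) (-1))
      = ((Nat.findGreatest (fun e => j.toList.take e <:+ i.toList) M : Nat) : Int) := by
  intro M
  have hcond : ∀ (e : Nat),
      (PySem.Str.endswith i (PySem.Str.slice j none (some (e : Int))) = true)
        ↔ (j.toList.take e <:+ i.toList) := by
    intro e
    rw [PySem.Str.endswith_eq, PySem.Chars.endswith_iff, PySem.Str.toList_slice,
      PySem.Chars.slice_eq_listSlice, PySem.List.slice_to _ (by positivity)]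
    simp
  induction M with
  | zero =>
    rw [PySem.List.pyRange_neg_one_cons (by norm_num),
      show ((0 : Nat) : Int) - 1 = -1 by norm_num,
      PySem.List.pyRange_neg_one_eq_nil (by norm_num)]
    simp [findOverlapFrom]
  | succ M ih =>
    rw [show ((M + 1 : Nat) : Int) = (M : Int) + 1 by push_cast; ring]
    rw [PySem.List.pyRange_neg_one_cons (by omega),
      show ((M : Int) + 1) - 1 = (M : Int) by ring]
    show (if PySem.Str.endswith i (PySem.Str.slice j none (some ((M : Int) + 1))) = true
        then (M : Int) + 1 else findOverlapFrom i j (PySem.List.pyRange (M : Int) (-1) (-1))) = _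
    rw [Nat.findGreatest_succ]
    by_cases h : j.toList.take (M + 1) <:+ i.toList
    · rw [if_pos (by rw [show ((M : Int) + 1) = ((M + 1 : Nat) : Int) by push_cast; ring, hcond]; exact h),
        if_pos h]
      push_cast; ring
    · rw [if_neg (by rw [show ((M : Int) + 1) = ((M + 1 : Nat) : Int) by push_cast; ring, hcond]; exact h),
        if_neg h, ih]

theorem getOverlapLength_eq (i j : String) :
    getOverlapLength i j
      = ((Nat.findGreatest (fun e => j.toList.take e <:+ i.toList) (min 500 j.toList.length) : Nat) : Int) := by
  unfold getOverlapLength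
  rw [show min 500 (PySem.Str.len j) = ((min 500 j.toList.length : Nat) : Int) by
    rw [PySem.Str.len_eq]; simp [Nat.cast_min]]
  rw [findOverlap_eq]

-- membership invariant of B's live list
theorem live_mem (p : List Char) : ∀ (t : List Char) (e : Nat),
    e ∈ t.foldl (spStep p) [0] ↔ e ≤ p.length ∧ p.take e <:+ t := by
  intro t
  induction t using List.reverseRecOn with
  | nil =>
    intro e
    simp only [List.foldl_nil, List.mem_singleton]
    constructor
    · rintro rfl; exact ⟨Nat.zero_le _, by simp⟩
    · rintro ⟨he, hs⟩
      have := List.IsSuffix.length_le hs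
      simp only [List.length_take, List.length_nil] at this
      omega
  | append_singleton t c ih =>
    intro e
    rw [List.foldl_append, List.foldl_cons, List.foldl_nil]
    unfold spStep
    simp only [List.mem_append, List.mem_singleton, List.mem_map, List.mem_filter,
      Bool.and_eq_true, decide_eq_true_eq, beq_iff_eq]
    constructor
    · rintro (⟨f, ⟨hfmem, hflt, hfc⟩, rfl⟩ | rfl)
      · have hf := (ih f).1 hfmem
        rw [List.getD_eq_getElem _ _ hflt] at hfc
        refine ⟨by omega, ?_⟩
        rw [List.take_succ_eq_append_getElem hflt, suffix_concat_iff]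
        exact ⟨hfc, hf.2⟩
      · exact ⟨Nat.zero_le _, by simp⟩
    · rintro ⟨he, hs⟩
      match e with
      | 0 => right; rfl
      | (f + 1) =>
        left
        have hflt : f < p.length := by omega
        rw [List.take_succ_eq_append_getElem hflt, suffix_concat_iff] at hs
        exact ⟨f, ⟨(ih f).2 ⟨by omega, hs.2⟩, hflt,
          by rw [List.getD_eq_getElem _ _ hflt]; exact hs.1⟩, rfl⟩

-- the live list stays strictly decreasing
theorem live_sorted (p : List Char) : ∀ (t : List Char),
    (t.foldl (spStep p) [0]).Pairwise (· > ·) := by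
  intro t
  induction t using List.reverseRecOn with
  | nil => simp
  | append_singleton t c ih =>
    rw [List.foldl_append, List.foldl_cons, List.foldl_nil]
    unfold spStep
    apply List.pairwise_append.2
    refine ⟨?_, by simp, ?_⟩
    · exact List.Pairwise.map _ (fun a b hab => by omega)
        (List.Pairwise.sublist List.filter_sublist ih)
    · intro a ha b hb
      simp only [List.mem_singleton] at hb
      subst hb
      rcases List.mem_map.1 ha with ⟨f, _, rfl⟩
      omega

theorem spOverlap_eq (text pat : String) :
    spOverlap text pat
      = ((Nat.findGreatest (fun e => pat.toList.take e <:+ text.toList) (min 500 pat.toList.length) : Nat) : Int) := by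
  simp only [spOverlap]
  have hp : (PySem.Str.slice pat none (some 500)).toList = pat.toList.take 500 := by
    rw [PySem.Str.toList_slice, PySem.Chars.slice_eq_listSlice,
      PySem.List.slice_to _ (by norm_num)]
    simp
  rw [hp]
  set J := pat.toList with hJ
  set I := text.toList with hI
  set p := J.take 500 with hpdef
  have hplen : p.length = min 500 J.length := by simp [hpdef, List.length_take]
  have ht : (if PySem.Str.len text > ((p).length : Int)
      then (PySem.Str.slice text (some (PySem.Str.len text - ((p).length : Int))) none).toList
      else I) = I.drop (I.length - p.length) := by
    rw [PySem.Str.len_eq, ← hI]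
    split_ifs with h
    · rw [PySem.Str.toList_slice, PySem.Chars.slice_eq_listSlice, ← hI,
        PySem.List.slice_from _ (by omega)]
      congr 1
      omega
    · rw [show I.length - p.length = 0 by omega, List.drop_zero]
  rw [ht]
  set t := I.drop (I.length - p.length) with htdef
  have htsuf : t <:+ I := List.drop_suffix _ _
  have htlen : t.length = I.length - (I.length - p.length) := List.length_drop ..
  -- transfer: for e ≤ p.length the candidate sets over (p, t) and (J, I) agree
  have htrans : ∀ e, e ≤ p.length → ((p.take e <:+ t) ↔ (J.take e <:+ I)) := by
    intro e he
    have hpe : p.take e = J.take e := by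
      rw [hpdef, List.take_take]
      congr 1
      omega
    rw [hpe]
    constructor
    · intro h; exact h.trans htsuf
    · intro h
      apply suffix_of_suffix_le _ _ _ h htsuf
      have h1 := List.IsSuffix.length_le h
      simp only [List.length_take] at h1 ⊢
      omega
  have hmem := live_mem p t
  have hsor := live_sorted p t
  have h0 : (0 : Nat) ∈ t.foldl (spStep p) [0] := (hmem 0).2 ⟨Nat.zero_le _, by simp⟩
  rcases hL : t.foldl (spStep p) [0] with _ | ⟨h, rest⟩
  · rw [hL] at h0; simp at h0
  · rw [hL] at hmem hsor h0
    simp only [List.getElem?_cons_zero, Option.getD_some]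
    congr 1
    symm
    rw [Nat.findGreatest_eq_iff]
    have hhmem := (hmem h).1 (List.mem_cons_self ..)
    refine ⟨by omega, ?_, ?_⟩
    · intro _
      exact (htrans h hhmem.1).1 hhmem.2
    · intro n hn hnle hP
      have hnmem : n ∈ h :: rest := (hmem n).2 ⟨by omega, (htrans n (by omega)).2 hP⟩
      rcases List.mem_cons.1 hnmem with rfl | hmem2
      · omega
      · have := (List.pairwise_cons.1 hsor).1 n hmem2
        omega

-- the two overlap computations agree
theorem ovl_eq (i j : String) : getOverlapLength i j = spOverlap i j := by
  rw [getOverlapLength_eq, spOverlap_eq]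

-- ===== VERDICT (by name: the statement is the Claim_ definition above) =====
theorem buildOverlapEdge_spec : Claim_equal_buildOverlapEdge := by
  intro contigs min_overlap graph _dom
  unfold Spec_buildOverlapEdge
  simp only [buildOverlapEdge, buildOverlapEdge_alt]
  rw [PySem.Dict.items_eq_map_keys _ (PySem.Dict.nodup_keys_ofList contigs) ""]
  simp only [List.map_map, List.foldl_map, Function.comp]
  by_cases hg : (graph == "directed") = true
  · simp only [hg, if_true]
    congr 1
    funext acc key1
    congr 1
    funext acc2 key2
    by_cases hk : key1 = key2
    · simp [hk]
    · simp only [hk, ne_eq, not_false_iff, if_true, if_neg, ovl_eq,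
        List.append_assoc, List.singleton_append]
  · simp only [hg, if_false, Bool.false_eq_true]
    congr 1
    funext acc key1
    congr 1
    funext acc2 key2
    by_cases hk : key1 = key2
    · simp [hk]
    · simp only [hk, ne_eq, not_false_iff, if_true, if_neg, ovl_eq]
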